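-- pv_equiv track=rewrite | github.com/EnvyW6567/CodingTestAlgorithm | Algorithm/Greedy/PerformanceAppraisal.py | solution
-- ===== SOURCE A (Python) =====
-- from collections import defaultdict
--
-- def solution(scores):
--     answer = -1
--     hash = defaultdict(list)
--
--     # 점수 배열을 해쉬맵 형식으로 변환하여 진행
--     s1 = []
--     for s in scores:
--         if not hash[s[0]]:
--             s1.append(s[0])
--         hash[s[0]].append(s[1])
--     s1.sort(reverse=True)
--
--     max = 0
--     survive = defaultdict(list) # 상여금 수령 대상자
--     for idx in s1:
--         hash[idx].sort()
--         for s in hash[idx]: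
--             if s >= max:
--                 max = s
--                 survive[idx].append(s)
--
--     # 원호가 애초에 상여금 수령 대상자가 아닌 경우 검증
--     if scores[0][1] not in survive[scores[0][0]]:
--         return -1
--
--     rank = [] # 상여금 수령 대상자의 인사 고과 점수 순위
--     for idx in survive:
--         for s in survive[idx]:
--             rank.append(idx + s)
--     rank.sort(reverse=True) # 순위 정렬
--
--     # 원호의 순위 도출
--     wanho = scores[0][0] + scores[0][1]
--     for rank, r in enumerate(rank):
--         if wanho == r:
--             answer = rank + 1
--             break
--
--     return answer
-- ===== SOURCE B (Python) =====
-- def solution(scores):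
--     # Direct dominance test: an appraisal (f, s) earns the bonus iff s >= 0 and no
--     # appraisal with a strictly larger first score has a larger second score.
--     f0, s0 = scores[0][0], scores[0][1]
--
--     def survives(f, s):
--         return s >= 0 and all(t[1] <= s for t in scores if t[0] > f)
--
--     if not survives(f0, s0):
--         return -1
--     wanho = f0 + s0
--     return 1 + sum(1 for t in scores
--                    if survives(t[0], t[1]) and t[0] + t[1] > wanho)
-- ===== Notes on version B (the rewrite author's own statement) =====
-- stated objective: simpler
-- what changed: B drops A's defaultdict grouping, the three sorts and the sorted rank scan, and instead tests each appraisal directly with a dominance predicate (s >= 0 and no entry with a strictly larger first score has a larger second score), counting survivors whose sum beats Wanho's.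
import Mathlib
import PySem

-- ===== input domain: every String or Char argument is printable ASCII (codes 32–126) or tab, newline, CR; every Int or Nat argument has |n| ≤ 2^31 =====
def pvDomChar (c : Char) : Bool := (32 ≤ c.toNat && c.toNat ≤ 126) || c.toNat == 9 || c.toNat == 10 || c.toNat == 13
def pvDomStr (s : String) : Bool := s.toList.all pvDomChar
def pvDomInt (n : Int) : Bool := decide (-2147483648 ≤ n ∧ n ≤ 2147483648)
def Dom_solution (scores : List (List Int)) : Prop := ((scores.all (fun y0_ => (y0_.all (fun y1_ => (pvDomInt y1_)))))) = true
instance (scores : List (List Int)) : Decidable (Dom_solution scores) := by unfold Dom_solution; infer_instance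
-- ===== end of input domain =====

-- B replaces A's hash-grouping, three sorts and the rank scan by a direct pairwise dominance test
-- (an alternative decomposition; no speed claim); the return values agree on all of Pre_.

-- ===== PORT A =====
-- first loop of A: build hash (key -> list of seconds) and s1 (keys in first-appearance order)
def pvBuild : List (List Int) → PySem.Dict Int (List Int) → List Int → PySem.Dict Int (List Int) × List Int
  | [], h, s1 => (h, s1)
  | s :: rest, h, s1 =>
    let k := PySem.List.pyGetD s 0 0
    let v := PySem.List.pyGetD s 1 0
    let cur := h.getD k []
    pvBuild rest (h.insert k (cur ++ [v])) (if cur = [] then s1 ++ [k] else s1)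

-- inner loop 'for s in hash[idx]'
def pvSweepGroup (idx : Int) : List Int → Int → PySem.Dict Int (List Int) → Int × PySem.Dict Int (List Int)
  | [], mx, sv => (mx, sv)
  | s :: g, mx, sv =>
    if mx ≤ s then pvSweepGroup idx g s (sv.insert idx (sv.getD idx [] ++ [s]))
    else pvSweepGroup idx g mx sv

-- outer loop 'for idx in s1'
def pvSweep (hash : PySem.Dict Int (List Int)) : List Int → Int → PySem.Dict Int (List Int) → Int × PySem.Dict Int (List Int)
  | [], mx, sv => (mx, sv)
  | idx :: rest, mx, sv =>
    let g := PySem.List.sorted (hash.getD idx []) (fun x => x) false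
    let p := pvSweepGroup idx g mx sv
    pvSweep hash rest p.1 p.2

-- final loop 'for rank, r in enumerate(rank): if wanho == r: … break' (answer stays -1 when absent)
def pvFindRank (wanho : Int) : List Int → Int → Int
  | [], _ => -1
  | r :: rest, i => if wanho = r then i + 1 else pvFindRank wanho rest (i + 1)

-- Note: A's membership test `scores[0][1] not in survive[scores[0][0]]` is a defaultdict access that
-- may create an empty entry for scores[0][0]; that entry can only exist on the -1 path, where the
-- dict is never read again, so reading with getD (no mutation) is observationally identical.
def solution (scores : List (List Int)) : Int :=
  let bp := pvBuild scores PySem.Dict.empty []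
  let hash := bp.1
  let s1 := PySem.List.sorted bp.2 (fun x => x) true
  let sv := (pvSweep hash s1 0 PySem.Dict.empty).2
  let f0 := PySem.List.pyGetD (PySem.List.pyGetD scores 0 []) 0 0
  let s0 := PySem.List.pyGetD (PySem.List.pyGetD scores 0 []) 1 0
  if s0 ∉ sv.getD f0 [] then -1
  else
    let rank := sv.items.foldl (fun acc kv => acc ++ kv.2.map (fun s => kv.1 + s)) []
    let ranks := PySem.List.sorted rank (fun x => x) true
    pvFindRank (f0 + s0) ranks 0

-- ===== PORT B =====
-- 'survives(f, s)': s >= 0 and all(t[1] <= s for t in scores if t[0] > f)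
def pvSurvives (scores : List (List Int)) (f s : Int) : Bool :=
  decide (0 ≤ s) &&
    (scores.filter (fun t => decide (f < PySem.List.pyGetD t 0 0))).all
      (fun t => decide (PySem.List.pyGetD t 1 0 ≤ s))

def solution_alt (scores : List (List Int)) : Int :=
  let f0 := PySem.List.pyGetD (PySem.List.pyGetD scores 0 []) 0 0
  let s0 := PySem.List.pyGetD (PySem.List.pyGetD scores 0 []) 1 0
  if !pvSurvives scores f0 s0 then -1
  else
    let wanho := f0 + s0
    1 + ((scores.countP (fun t =>
        pvSurvives scores (PySem.List.pyGetD t 0 0) (PySem.List.pyGetD t 1 0)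
          && decide (wanho < PySem.List.pyGetD t 0 0 + PySem.List.pyGetD t 1 0)) : Int))

-- ===== PRECONDITION & SPEC =====
-- Pre_ excludes exactly the inputs where the Python A raises IndexError:
-- empty scores (scores[0]) and rows with fewer than two entries (s[0]/s[1]).
def Pre_solution (scores : List (List Int)) : Prop :=
  scores ≠ [] ∧ ∀ t ∈ scores, 2 ≤ t.length
instance (scores : List (List Int)) : Decidable (Pre_solution scores) := by
  unfold Pre_solution; infer_instance

def pvWitness_solution : List (List Int) := [[2, 2], [1, 4], [3, 2], [3, 2], [2, 1]]

def Spec_solution (scores : List (List Int)) (out : Int) : Prop := out = solution_alt scores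
instance (scores : List (List Int)) (out : Int) : Decidable (Spec_solution scores out) := by
  unfold Spec_solution; infer_instance

-- ===== CLAIM (what is proved, stated in full; the proofs are below) =====
def Claim_equal_solution : Prop := ∀ (scores : List (List Int)), Dom_solution scores → Pre_solution scores → Spec_solution scores (solution scores)

-- ===== LEMMAS AND PROOFS =====

-- proof-only abbreviations
def pvKey (t : List Int) : Int := PySem.List.pyGetD t 0 0
def pvSec (t : List Int) : Int := PySem.List.pyGetD t 1 0
-- the seconds of the rows with first entry k, in input order (contents of hash[k])
def pvGrp (scores : List (List Int)) (k : Int) : List Int :=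
  (scores.filter (fun t => pvKey t == k)).map pvSec
-- max(0, seconds of rows with a strictly larger first entry): the sweep threshold at key k
def pvM (scores : List (List Int)) (k : Int) : Int :=
  ((scores.filter (fun t => decide (k < pvKey t))).map pvSec).foldl max 0
-- the survivors recorded for key k (contents of survive[k])
def pvSurv (scores : List (List Int)) (k : Int) : List Int :=
  (PySem.List.sorted (pvGrp scores k) (fun x => x) false).filter (fun s => decide (pvM scores k ≤ s))

lemma pv_foldl_max_le (l : List Int) : ∀ (a s : Int), l.foldl max a ≤ s ↔ a ≤ s ∧ ∀ x ∈ l, x ≤ s := by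
  induction l with
  | nil => simp
  | cons x t ih =>
    intro a s
    simp only [List.foldl_cons, ih, List.mem_cons]
    constructor
    · rintro ⟨h1, h2⟩
      exact ⟨le_trans (le_max_left a x) h1,
        fun y hy => hy.elim (fun e => e ▸ le_trans (le_max_right a x) h1) (h2 y)⟩
    · rintro ⟨h1, h2⟩
      exact ⟨max_le h1 (h2 x (Or.inl rfl)), fun y hy => h2 y (Or.inr hy)⟩

lemma pvSurvives_iff (scores : List (List Int)) (f s : Int) :
    pvSurvives scores f s = true ↔ pvM scores f ≤ s := by
  rw [pvM, pv_foldl_max_le]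
  simp only [pvSurvives, pvKey, pvSec, Bool.and_eq_true, decide_eq_true_eq, List.all_eq_true,
    List.mem_filter, List.mem_map]
  constructor
  · rintro ⟨h0, h1⟩
    refine ⟨h0, ?_⟩
    rintro x ⟨t, ⟨ht, hf⟩, rfl⟩
    exact h1 t ⟨ht, hf⟩
  · rintro ⟨h0, h1⟩
    refine ⟨h0, ?_⟩
    intro t ht
    exact h1 (PySem.List.pyGetD t 1 0) ⟨t, ht, rfl⟩

lemma pvSurvives_eq (scores : List (List Int)) (f s : Int) :
    pvSurvives scores f s = decide (pvM scores f ≤ s) := by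
  have h := pvSurvives_iff scores f s
  by_cases hm : pvM scores f ≤ s
  · simp [hm, h.mpr hm]
  · simp only [hm, decide_false]
    exact Bool.eq_false_iff.mpr (fun hh => hm (h.mp hh))

lemma pvBuild_getD (scores : List (List Int)) :
    ∀ (h : PySem.Dict Int (List Int)) (s1 : List Int) (k : Int),
      ((pvBuild scores h s1).1).getD k [] = h.getD k [] ++ pvGrp scores k := by
  induction scores with
  | nil => intro h s1 k; simp [pvBuild, pvGrp]
  | cons s rest ih =>
    intro h s1 k
    simp only [pvBuild, ih]
    by_cases hk : k = PySem.List.pyGetD s 0 0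
    · subst hk
      rw [PySem.Dict.getD_insert_self]
      simp [pvGrp, pvKey, pvSec]
    · rw [PySem.Dict.getD_insert_of_ne _ _ _ hk]
      have : (pvKey s == k) = false := by simp [pvKey]; exact fun e => hk e.symm
      simp [pvGrp, this]

lemma pvBuild_s1 (scores : List (List Int)) :
    ∀ (h : PySem.Dict Int (List Int)) (s1 : List Int),
      (∀ k, k ∈ s1 ↔ h.getD k [] ≠ []) → s1.Nodup →
      ((∀ k, k ∈ (pvBuild scores h s1).2 ↔ ((pvBuild scores h s1).1).getD k [] ≠ []) ∧
        (pvBuild scores h s1).2.Nodup) := by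
  induction scores with
  | nil => intro h s1 hmem hnd; exact ⟨fun k => hmem k, hnd⟩
  | cons s rest ih =>
    intro h s1 hmem hnd
    simp only [pvBuild]
    set k0 := PySem.List.pyGetD s 0 0 with hk0
    set v := PySem.List.pyGetD s 1 0 with hv
    set cur := h.getD k0 [] with hcur
    apply ih
    · intro k
      by_cases hk : k = k0
      · subst hk
        rw [PySem.Dict.getD_insert_self]
        simp only [ne_eq, List.append_eq_nil_iff, List.cons_ne_nil, and_false, not_false_iff,
          iff_true]
        by_cases hc : cur = []
        · simp [hc]
        · simp [hc]
          exact (hmem k0).mpr (by rw [← hcur]; simpa using hc)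
      · rw [PySem.Dict.getD_insert_of_ne _ _ _ hk]
        by_cases hc : cur = [] <;> simp [hc, hmem k, hk]
    · by_cases hc : cur = []
      · simp only [hc]
        refine List.Nodup.append hnd (List.nodup_singleton _) ?_
        intro a ha hb
        simp at hb; subst hb
        exact ((hmem k0).mp ha) (by rw [← hcur]; exact hc)
      · simpa [hc] using hnd

lemma pvSweepGroup_char (idx : Int) :
    ∀ (g : List Int) (mx : Int) (sv : PySem.Dict Int (List Int)),
      g.Pairwise (· ≤ ·) →
      pvSweepGroup idx g mx sv =
        (g.foldl max mx,
          if (g.filter (fun s => decide (mx ≤ s))) = [] then sv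
          else sv.insert idx (sv.getD idx [] ++ g.filter (fun s => decide (mx ≤ s)))) := by
  intro g
  induction g with
  | nil => intro mx sv _; simp [pvSweepGroup]
  | cons s g ih =>
    intro mx sv hpw
    rcases List.pairwise_cons.mp hpw with ⟨hs, hg⟩
    by_cases h : mx ≤ s
    · have hflt : g.filter (fun x => decide (s ≤ x)) = g :=
        List.filter_eq_self.mpr (fun x hx => by simpa using hs x hx)
      have hflt2 : g.filter (fun x => decide (mx ≤ x)) = g :=
        List.filter_eq_self.mpr (fun x hx => by simp; exact le_trans h (hs x hx))
      simp only [pvSweepGroup, ih _ _ hg, hflt, List.filter_cons, h, decide_true, hflt2,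
        List.foldl_cons]
      have hmax : max mx s = s := max_eq_right h
      rw [hmax]
      cases g with
      | nil => simp
      | cons y t =>
        simp only [List.cons_ne_nil]
        rw [PySem.Dict.getD_insert_self, PySem.Dict.insert_insert_self]
        simp
    · have hmax : max mx s = mx := max_eq_left (le_of_not_ge h)
      simp only [pvSweepGroup, ih _ _ hg, List.filter_cons, h, decide_false,
        List.foldl_cons, hmax]
      simp

lemma pv_filter_split {α : Type} (p q r : α → Bool)
    (h : ∀ x, p x = (q x || r x)) (hd : ∀ x, ¬(q x = true ∧ r x = true)) :
    ∀ l : List α, (l.filter p).Perm (l.filter q ++ l.filter r) := by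
  intro l; induction l with
  | nil => simp
  | cons x l ih =>
    simp only [List.filter_cons]
    by_cases hq : q x = true
    · have hr : r x = false := by
        cases hrx : r x
        · rfl
        · exact absurd ⟨hq, hrx⟩ (hd x)
      have hp : p x = true := by rw [h]; simp [hq]
      simp only [hp, hq, hr, if_true]
      exact ih.cons x
    · have hq' : q x = false := Bool.eq_false_iff.mpr hq
      by_cases hr : r x = true
      · have hp : p x = true := by rw [h]; simp [hr]
        simp only [hp, hq', hr, if_true]
        exact (ih.cons x).trans List.perm_middle.symm
      · have hr' : r x = false := Bool.eq_false_iff.mpr hr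
        have hp : p x = false := by rw [h]; simp [hq', hr']
        simp only [hp, hq', hr']
        exact ih

lemma pvSweep_char (scores : List (List Int)) (hash : PySem.Dict Int (List Int)) :
    ∀ (ks : List Int) (mx : Int) (sv : PySem.Dict Int (List Int)),
      ks.Pairwise (fun a b => b < a) →
      (∀ t ∈ scores, pvKey t ∈ ks ∨ ∀ j ∈ ks, j < pvKey t) →
      mx = ((scores.filter (fun t => !(decide (pvKey t ∈ ks)))).map pvSec).foldl max 0 →
      (∀ j ∈ ks, sv.contains j = false) →
      (∀ j ∈ ks, hash.getD j [] = pvGrp scores j) →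
      ((pvSweep hash ks mx sv).2.items
          = sv.items ++ (ks.filter (fun k => !((pvSurv scores k).isEmpty))).map
              (fun k => (k, pvSurv scores k)))
      ∧ (∀ k, (pvSweep hash ks mx sv).2.getD k []
          = sv.getD k [] ++ (if k ∈ ks then pvSurv scores k else [])) := by
  intro ks
  induction ks with
  | nil =>
    intro mx sv _ _ _ _ _
    refine ⟨by simp [pvSweep], fun k => by simp [pvSweep]⟩
  | cons idx rest ih =>
    intro mx sv hpw hcov hmx hsv hh
    rcases List.pairwise_cons.mp hpw with ⟨hlt, hpw'⟩
    have hidxnr : idx ∉ rest := fun hm => lt_irrefl idx (hlt idx hm)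
    have hgd : hash.getD idx [] = pvGrp scores idx := hh idx (List.mem_cons_self)
    have hGpw : (PySem.List.sorted (pvGrp scores idx) (fun x => x) false).Pairwise (· ≤ ·) := by
      simpa using PySem.List.sorted_pairwise (pvGrp scores idx) (fun x => x)
    have hGperm : (PySem.List.sorted (pvGrp scores idx) (fun x => x) false).Perm
        (pvGrp scores idx) := PySem.List.sorted_perm _ _ _
    have hmx_idx : mx = pvM scores idx := by
      rw [hmx, pvM]
      congr 2
      apply List.filter_congr
      intro t ht
      rcases hcov t ht with hin | hout
      · rcases List.mem_cons.mp hin with rfl | hr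
        · simp
        · have h1 : pvKey t ∈ idx :: rest := hin
          have h2 : ¬ (idx < pvKey t) := not_lt.mpr (le_of_lt (hlt _ hr))
          simp [h1, h2]
      · have h2 : idx < pvKey t := hout idx List.mem_cons_self
        have h1 : pvKey t ∉ idx :: rest := by
          intro hc
          exact absurd (hout _ hc) (lt_irrefl _)
        simp [h1, h2]
    have hstep : pvSweep hash (idx :: rest) mx sv =
        pvSweep hash rest
          (pvSweepGroup idx (PySem.List.sorted (pvGrp scores idx) (fun x => x) false) mx sv).1
          (pvSweepGroup idx (PySem.List.sorted (pvGrp scores idx) (fun x => x) false) mx sv).2 := by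
      simp only [pvSweep, hgd]
    have hgrp := pvSweepGroup_char idx
      (PySem.List.sorted (pvGrp scores idx) (fun x => x) false) mx sv hGpw
    have hsurv_eq : (PySem.List.sorted (pvGrp scores idx) (fun x => x) false).filter
        (fun s => decide (mx ≤ s)) = pvSurv scores idx := by
      rw [pvSurv, hmx_idx]
    rw [hsurv_eq] at hgrp
    set G := PySem.List.sorted (pvGrp scores idx) (fun x => x) false with hG
    set sv' : PySem.Dict Int (List Int) :=
      (if pvSurv scores idx = [] then sv
       else sv.insert idx (sv.getD idx [] ++ pvSurv scores idx)) with hsv'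
    have hcontains : sv.contains idx = false := hsv idx List.mem_cons_self
    have hgetD0 : sv.getD idx [] = [] := PySem.Dict.getD_of_not_contains sv [] hcontains
    have hcov' : ∀ t ∈ scores, pvKey t ∈ rest ∨ ∀ j ∈ rest, j < pvKey t := by
      intro t ht
      rcases hcov t ht with hin | hout
      · rcases List.mem_cons.mp hin with heq | hr
        · exact Or.inr (fun j hj => heq ▸ hlt j hj)
        · exact Or.inl hr
      · exact Or.inr (fun j hj => hout j (List.mem_cons_of_mem _ hj))
    have hmx' : G.foldl max mx =
        ((scores.filter (fun t => !(decide (pvKey t ∈ rest)))).map pvSec).foldl max 0 := by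
      have e1 : G.foldl max mx = (pvGrp scores idx).foldl max mx := hGperm.foldl_eq mx
      have hsplit := pv_filter_split (fun t => !(decide (pvKey t ∈ rest)))
        (fun t => !(decide (pvKey t ∈ idx :: rest))) (fun t => pvKey t == idx)
        (by
          intro x
          by_cases hx : pvKey x = idx
          · simp [hx, hidxnr]
          · simp [hx, List.mem_cons])
        (by
          intro x ⟨h1, h2⟩
          rw [beq_iff_eq] at h2
          simp [h2, List.mem_cons] at h1)
        scores
      have e2 := (hsplit.map pvSec).foldl_eq (f := (max : Int → Int → Int)) 0
      rw [e1, e2, List.map_append, List.foldl_append, ← hmx]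
      simp only [pvGrp]
    have hsv'' : ∀ j ∈ rest, sv'.contains j = false := by
      intro j hj
      have hne : j ≠ idx := fun e => hidxnr (e ▸ hj)
      rw [hsv']
      split
      · exact hsv j (List.mem_cons_of_mem _ hj)
      · rw [PySem.Dict.contains_insert]
        simp [hne, hsv j (List.mem_cons_of_mem _ hj)]
    have hh' : ∀ j ∈ rest, hash.getD j [] = pvGrp scores j :=
      fun j hj => hh j (List.mem_cons_of_mem _ hj)
    have ihr := ih (G.foldl max mx) sv' hpw' hcov' hmx' hsv'' hh'
    have hrw : pvSweep hash (idx :: rest) mx sv = pvSweep hash rest (G.foldl max mx) sv' := by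
      rw [hstep, hgrp]
    rw [hrw]
    constructor
    · rw [ihr.1]
      by_cases hemp : pvSurv scores idx = []
      · simp only [hsv', hemp, List.filter_cons, List.isEmpty_nil, Bool.not_true]
        simp []
      · have : sv'.items = sv.items ++ [(idx, pvSurv scores idx)] := by
          rw [hsv', if_neg hemp, hgetD0]
          simpa using PySem.Dict.items_insert_of_not_contains sv _ hcontains
        rw [this]
        have hne : ((pvSurv scores idx).isEmpty) = false := by
          simpa [List.isEmpty_iff] using hemp
        simp [hne, List.append_assoc]
    · intro k
      rw [ihr.2 k]
      by_cases hk : k = idx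
      · subst hk
        have hknr : k ∉ rest := hidxnr
        simp only [hknr, List.mem_cons, true_or, if_pos, hgetD0, List.nil_append]
        by_cases hemp : pvSurv scores k = []
        · simp [hsv', hemp, hgetD0]
        · simp [hsv', hemp, hgetD0, PySem.Dict.getD_insert_self]
      · have hgd' : sv'.getD k [] = sv.getD k [] := by
          rw [hsv']
          split
          · rfl
          · exact PySem.Dict.getD_insert_of_ne sv _ _ hk
        rw [hgd']
        have hmm : (k ∈ idx :: rest) ↔ (k ∈ rest) := by simp [List.mem_cons, hk]
        simp only [hmm]

lemma pvFindRank_eq (w : Int) :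
    ∀ (l : List Int) (i : Int), l.Pairwise (fun a b => b ≤ a) → w ∈ l →
      pvFindRank w l i = i + 1 + (l.countP (fun r => decide (w < r)) : Int) := by
  intro l
  induction l with
  | nil => intro i _ h; simp at h
  | cons r rest ih =>
    intro i hpw hw
    rcases List.pairwise_cons.mp hpw with ⟨hle, hpw'⟩
    by_cases he : w = r
    · subst he
      have h0 : (w :: rest).countP (fun x => decide (w < x)) = 0 := by
        rw [List.countP_eq_zero]
        intro x hx
        rcases List.mem_cons.mp hx with rfl | hxr
        · simp
        · simpa using not_lt.mpr (hle x hxr)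
      simp [pvFindRank, h0]
    · have hwr : w ∈ rest := by
        rcases List.mem_cons.mp hw with h | h
        · exact absurd h he
        · exact h
      have hlt : w < r := lt_of_le_of_ne (hle w hwr) he
      rw [pvFindRank, if_neg he, ih (i + 1) hpw' hwr, List.countP_cons]
      simp only [hlt, decide_true]
      push_cast
      ring

lemma pv_sum_ite (a c : Int) :
    ∀ K : List Int, K.Nodup → a ∈ K →
      (K.map (fun k => if k = a then c else 0)).sum = c := by
  intro K
  induction K with
  | nil => simp
  | cons k K ih =>
    intro hnd ha
    rcases List.nodup_cons.mp hnd with ⟨hk, hnd'⟩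
    simp only [List.map_cons, List.sum_cons]
    rcases List.mem_cons.mp ha with rfl | ha'
    · have hz : (K.map (fun j => if j = a then c else 0)).sum = 0 := by
        rw [List.sum_eq_zero]
        intro x hx
        rcases List.mem_map.mp hx with ⟨j, hj, rfl⟩
        have : j ≠ a := fun e => hk (e ▸ hj)
        simp [this]
      simp [hz]
    · have hne : k ≠ a := fun e => hk (e ▸ ha')
      simp [hne, ih hnd' ha']

lemma pv_countP_partition (P : List Int → Bool) :
    ∀ (l : List (List Int)) (K : List Int), K.Nodup → (∀ t ∈ l, pvKey t ∈ K) →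
      (l.countP P : Int) =
        (K.map (fun k => ((l.filter (fun t => pvKey t == k)).countP P : Int))).sum := by
  intro l
  induction l with
  | nil => intro K _ _; simp
  | cons t l ih =>
    intro K hnd hcov
    have hmem : pvKey t ∈ K := hcov t List.mem_cons_self
    have hstep : ∀ k ∈ K, ((List.filter (fun t' => pvKey t' == k) (t :: l)).countP P : Int)
        = ((l.filter (fun t' => pvKey t' == k)).countP P : Int)
          + (if k = pvKey t then (if P t then (1 : Int) else 0) else 0) := by
      intro k _
      by_cases hk : pvKey t = k
      · rw [List.filter_cons, if_pos (by simpa using hk), List.countP_cons, if_pos hk.symm]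
        cases hp : P t <;> simp only [if_true, if_false, Bool.false_eq_true] <;> push_cast <;>
          ring
      · rw [List.filter_cons, if_neg (by simpa using hk), if_neg (fun e => hk e.symm)]
        ring
    rw [List.map_congr_left hstep, PySem.List.sum_map_add_int, ← ih K hnd
      (fun u hu => hcov u (List.mem_cons_of_mem _ hu)), pv_sum_ite (pvKey t) _ K hnd hmem,
      List.countP_cons]
    cases hp : P t <;> push_cast <;> simp

lemma pv_countP_flatMap {α : Type} (g : α → List Int) (p : Int → Bool) :
    ∀ l : List α, (((l.flatMap g).countP p : Nat) : Int)
      = (l.map (fun x => (((g x).countP p : Nat) : Int))).sum := by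
  intro l
  induction l with
  | nil => simp
  | cons x l ih =>
    simp only [List.flatMap_cons, List.countP_append, List.map_cons, List.sum_cons, ← ih]
    push_cast
    ring

lemma pv_sum_filter (c : Int → Int) (q : Int → Bool) :
    ∀ K : List Int, (∀ k ∈ K, q k = false → c k = 0) →
      ((K.filter q).map c).sum = (K.map c).sum := by
  intro K
  induction K with
  | nil => intro _; simp
  | cons k K ih =>
    intro h
    rw [List.filter_cons]
    by_cases hq : q k = true
    · simp only [hq, if_pos, List.map_cons, List.sum_cons]
      rw [ih (fun j hj => h j (List.mem_cons_of_mem _ hj))]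
    · have hq' : q k = false := Bool.eq_false_iff.mpr hq
      rw [if_neg (by simp [hq']), ih (fun j hj => h j (List.mem_cons_of_mem _ hj)),
        List.map_cons, List.sum_cons, h k List.mem_cons_self hq']
      ring

lemma pv_ckey (S : List (List Int)) (w k : Int) :
    (((pvSurv S k).map (fun s => k + s)).countP (fun r => decide (w < r)) : Int)
      = ((S.filter (fun t => pvKey t == k)).countP
          (fun t => pvSurvives S (pvKey t) (pvSec t)
            && decide (w < pvKey t + pvSec t)) : Int) := by
  congr 1
  rw [List.countP_map, pvSurv, List.countP_filter,
    (PySem.List.sorted_perm (pvGrp S k) (fun x => x) false).countP_eq, pvGrp, List.countP_map,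
    List.countP_filter, List.countP_filter]
  apply List.countP_congr
  intro t _
  by_cases hkt : pvKey t = k
  · simp [Function.comp, hkt, pvSurvives_eq, and_comm]
  · simp [Function.comp, hkt]

-- ===== VERDICT (by name: the statement is the Claim_ definition above) =====
theorem solution_spec : Claim_equal_solution := by
  unfold Claim_equal_solution
  intro scoresArg _ hpre
  unfold Spec_solution
  obtain ⟨hne, -⟩ := hpre
  obtain ⟨t0, rest0, rfl⟩ := List.exists_cons_of_ne_nil hne
  set S : List (List Int) := t0 :: rest0 with hS
  have hpg0 : PySem.List.pyGetD S 0 ([] : List Int) = t0 := by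
    rw [hS, PySem.List.pyGetD_zero_cons]
  simp only [solution, solution_alt, hpg0,
    show PySem.List.pyGetD t0 0 0 = pvKey t0 from rfl,
    show PySem.List.pyGetD t0 1 0 = pvSec t0 from rfl]
  set s1 : List Int := (pvBuild S PySem.Dict.empty []).2 with hs1def
  set KS : List Int := PySem.List.sorted s1 (fun x => x) true with hKS
  set sv : PySem.Dict Int (List Int) :=
    (pvSweep (pvBuild S PySem.Dict.empty []).1 KS 0 PySem.Dict.empty).2 with hsvdef
  have hgetD : ∀ k, ((pvBuild S PySem.Dict.empty []).1).getD k [] = pvGrp S k := by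
    intro k
    rw [pvBuild_getD]
    simp
  have hs1 := pvBuild_s1 S PySem.Dict.empty [] (by intro k; simp) List.nodup_nil
  have hs1mem : ∀ k, k ∈ s1 ↔ pvGrp S k ≠ [] := by
    intro k
    rw [hs1def, hs1.1 k, hgetD k]
  have hs1nd : s1.Nodup := hs1.2
  have hperm : KS.Perm s1 := PySem.List.sorted_perm _ _ _
  have hKSnodup : KS.Nodup := hperm.nodup_iff.mpr hs1nd
  have hKSmem : ∀ k, k ∈ KS ↔ pvGrp S k ≠ [] := fun k => hperm.mem_iff.trans (hs1mem k)
  have hKSpw : KS.Pairwise (fun a b => b < a) := by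
    have h1 : KS.Pairwise (fun a b => b ≤ a) := by
      rw [hKS]
      simpa using PySem.List.sorted_pairwise_rev s1 (fun x => x)
    exact (h1.and hKSnodup).imp (fun h => lt_of_le_of_ne h.1 (Ne.symm h.2))
  have hcovmem : ∀ t ∈ S, pvKey t ∈ KS := by
    intro t ht
    rw [hKSmem]
    intro h0
    have hm : pvSec t ∈ pvGrp S (pvKey t) :=
      List.mem_map_of_mem (List.mem_filter.mpr ⟨ht, by simp⟩)
    rw [h0] at hm
    simp at hm
  have hcovs1 : ∀ t ∈ S, pvKey t ∈ s1 := fun t ht => hperm.mem_iff.mp (hcovmem t ht)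
  have hsw := pvSweep_char S (pvBuild S PySem.Dict.empty []).1 KS 0 PySem.Dict.empty hKSpw
      (fun t ht => Or.inl (hcovmem t ht))
      (by
        have he : S.filter (fun t => !(decide (pvKey t ∈ KS))) = [] := by
          rw [List.filter_eq_nil_iff]
          intro t ht
          simp [hcovmem t ht]
        rw [he]
        rfl)
      (by intro j _; exact PySem.Dict.contains_empty j)
      (fun j _ => hgetD j)
  rw [← hsvdef] at hsw
  have hsvgetD : ∀ k, sv.getD k [] = if k ∈ KS then pvSurv S k else [] := by
    intro k
    rw [hsw.2 k]
    simp
  have hsvitems : sv.items =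
      (KS.filter (fun k => !((pvSurv S k).isEmpty))).map (fun k => (k, pvSurv S k)) := by
    rw [hsw.1]
    rfl
  have hf0KS : pvKey t0 ∈ KS := hcovmem t0 (by simp [hS])
  have hgrp0 : pvSec t0 ∈ pvGrp S (pvKey t0) :=
    List.mem_map_of_mem (List.mem_filter.mpr ⟨by simp [hS], by simp⟩)
  have hmem_iff : pvSec t0 ∈ sv.getD (pvKey t0) [] ↔ pvM S (pvKey t0) ≤ pvSec t0 := by
    rw [hsvgetD, if_pos hf0KS, pvSurv, List.mem_filter, PySem.List.mem_sorted]
    simp [hgrp0]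
  by_cases hsurv0 : pvM S (pvKey t0) ≤ pvSec t0
  · rw [if_neg (not_not_intro (hmem_iff.mpr hsurv0)),
      if_neg (by simp [pvSurvives_iff, hsurv0])]
    have hs0surv : pvSec t0 ∈ pvSurv S (pvKey t0) := by
      have h := hmem_iff.mpr hsurv0
      rwa [hsvgetD, if_pos hf0KS] at h
    set w : Int := pvKey t0 + pvSec t0 with hw
    set p : Int → Bool := fun r => decide (w < r) with hp
    have hrank : sv.items.foldl (fun acc kv => acc ++ kv.2.map (fun s => kv.1 + s)) [] =
        sv.items.flatMap (fun kv => kv.2.map (fun s => kv.1 + s)) := by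
      simpa using PySem.List.foldl_append_eq_flatMap
        (fun kv : Int × List Int => kv.2.map (fun s => kv.1 + s)) sv.items []
    rw [hrank]
    set rank : List Int := sv.items.flatMap (fun kv => kv.2.map (fun s => kv.1 + s)) with hr
    set ranks : List Int := PySem.List.sorted rank (fun x => x) true with hrs
    have hrperm : ranks.Perm rank := PySem.List.sorted_perm _ _ _
    have hrpw : ranks.Pairwise (fun a b => b ≤ a) := by
      rw [hrs]
      simpa using PySem.List.sorted_pairwise_rev rank (fun x => x)
    have hwmem : w ∈ ranks := by
      rw [hrs, PySem.List.mem_sorted, hr, List.mem_flatMap]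
      refine ⟨(pvKey t0, pvSurv S (pvKey t0)), ?_, ?_⟩
      · rw [hsvitems]
        exact List.mem_map_of_mem (List.mem_filter.mpr
          ⟨hf0KS, by simpa [List.isEmpty_iff] using List.ne_nil_of_mem hs0surv⟩)
      · exact List.mem_map.mpr ⟨pvSec t0, hs0surv, rfl⟩
    rw [pvFindRank_eq w ranks 0 hrpw hwmem]
    have hcnt : ((ranks.countP p : Nat) : Int) = ((S.countP (fun t =>
        pvSurvives S (pvKey t) (pvSec t) && decide (w < pvKey t + pvSec t)) : Nat) : Int) := by
      rw [hrperm.countP_eq, hr, pv_countP_flatMap, hsvitems, List.map_map]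
      have hstep2 : ∀ k ∈ KS.filter (fun k => !((pvSurv S k).isEmpty)),
          ((fun x : Int × List Int => ((((fun kv : Int × List Int =>
              kv.2.map (fun s => kv.1 + s)) x).countP p : Nat) : Int)) ∘
            (fun k => (k, pvSurv S k))) k
            = (((pvSurv S k).map (fun s => k + s)).countP p : Int) := by
        intro k _
        rfl
      rw [List.map_congr_left hstep2,
        pv_sum_filter _ _ KS (by
          intro k _ hq
          have hnil : pvSurv S k = [] := by simpa [List.isEmpty_iff] using hq
          simp [hnil]),
        (hperm.map _).sum_eq,
        List.map_congr_left (fun k _ => pv_ckey S w k),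
        ← pv_countP_partition _ S s1 hs1nd hcovs1]
    rw [hcnt]
    have hsame : (S.countP (fun t =>
        pvSurvives S (pvKey t) (pvSec t) && decide (w < pvKey t + pvSec t)))
        = (S.countP (fun t =>
            pvSurvives S (PySem.List.pyGetD t 0 0) (PySem.List.pyGetD t 1 0)
              && decide (w < PySem.List.pyGetD t 0 0 + PySem.List.pyGetD t 1 0))) :=
      List.countP_congr (fun x _ => Iff.rfl)
    rw [hsame]
    omega
  · rw [if_pos (by simpa using fun hc => hsurv0 (hmem_iff.mp hc)),
      if_pos (by
        rw [Bool.not_eq_true']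
        exact Bool.eq_false_iff.mpr (fun hh => hsurv0 ((pvSurvives_iff S _ _).mp hh)))]
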